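-- pv_equiv track=rewrite | github.com/leaf76/lazy_blacktea | ui/command_execution_manager.py | get_valid_commands_from_text
-- ===== SOURCE A (Python) =====
-- from typing import Any, Dict, List, Callable, Optional
--
-- def get_valid_commands_from_text(text: str) -> List[str]:
--     """Extract valid commands from text, supporting line continuation with backslash."""
--     if not text.strip():
--         return []
--
--     lines = text.split('\n')
--     commands = []
--     current_command = []
--
--     for line in lines:
--         stripped = line.strip()
--         # Skip empty lines and comments
--         if not stripped or stripped.startswith('#'):
--             # If we have a pending command, finalize it
--             if current_command:
--                 commands.append(' '.join(current_command))
--                 current_command = []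
--             continue
--
--         # Check for line continuation (ends with \)
--         if stripped.endswith('\\'):
--             # Remove the backslash and add to current command
--             current_command.append(stripped[:-1].rstrip())
--         else:
--             # No continuation - finalize the command
--             current_command.append(stripped)
--             commands.append(' '.join(current_command))
--             current_command = []
--
--     # Handle any remaining command
--     if current_command:
--         commands.append(' '.join(current_command))
--
--     return commands
-- ===== SOURCE B (Python) =====
-- def get_valid_commands_from_text(text):
--     """Extract valid commands from text, supporting line continuation with backslash.
--
--     Different decomposition: first group the lines into blocks of consecutive
--     non-blank, non-comment lines (blank/comment lines act only as separators),
--     then extract the commands from each block independently.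
--     """
--     if not text.strip():
--         return []
--
--     # Phase 1: group stripped lines into blocks separated by blank/comment lines.
--     blocks = []
--     cur = []
--     for line in text.split('\n'):
--         s = line.strip()
--         if not s or s.startswith('#'):
--             if cur:
--                 blocks.append(cur)
--                 cur = []
--         else:
--             cur.append(s)
--     if cur:
--         blocks.append(cur)
--
--     # Phase 2: within each block, join continuation lines into commands.
--     commands = []
--     for block in blocks:
--         acc = []
--         for s in block:
--             if s.endswith('\\'):
--                 acc.append(s[:-1].rstrip())
--             else:
--                 acc.append(s)
--                 commands.append(' '.join(acc))
--                 acc = []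
--         if acc:
--             commands.append(' '.join(acc))
--     return commands
-- ===== Notes on version B (the rewrite author's own statement) =====
-- stated objective: alternative
-- what changed: B replaces A's single stateful line loop (flushing pending continuations inline at each blank/comment line) by a two-phase decomposition: first group lines into blocks of consecutive non-blank/non-comment lines, then extract commands from each block independently.
import Mathlib
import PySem

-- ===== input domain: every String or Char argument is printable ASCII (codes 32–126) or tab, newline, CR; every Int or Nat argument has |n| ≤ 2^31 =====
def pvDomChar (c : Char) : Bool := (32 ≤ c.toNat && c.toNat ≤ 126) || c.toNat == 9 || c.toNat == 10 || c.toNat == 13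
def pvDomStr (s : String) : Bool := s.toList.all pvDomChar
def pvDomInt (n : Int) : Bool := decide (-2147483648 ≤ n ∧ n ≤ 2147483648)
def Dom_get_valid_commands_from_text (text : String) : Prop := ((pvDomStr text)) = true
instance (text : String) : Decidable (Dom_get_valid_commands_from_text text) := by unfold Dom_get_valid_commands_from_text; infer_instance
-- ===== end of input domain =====

-- B differs from A by decomposition only: it first groups lines into blocks of
-- consecutive non-blank/non-comment lines, then extracts commands per block.

-- ===== PORT A =====
-- the body of A's for-loop: state is (commands, current_command)
def pvStepA : List String × List String → String → List String × List String
  | (commands, current), line =>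
    let stripped := PySem.Str.strip line
    if stripped = "" || PySem.Str.startswith stripped "#" then
      if current ≠ [] then (commands ++ [PySem.Str.join " " current], []) else (commands, current)
    else if PySem.Str.endswith stripped "\\" then
      (commands, current ++ [PySem.Str.rstrip (PySem.Str.slice stripped none (some (-1)))])
    else
      (commands ++ [PySem.Str.join " " (current ++ [stripped])], [])

def get_valid_commands_from_text (text : String) : List String :=
  if PySem.Str.strip text = "" then []
  else
    let lines := (PySem.Str.split? text "\n").getD []   -- sep "\n" ≠ "", so split? is always some
    let res := lines.foldl pvStepA ([], [])
    if res.2 ≠ [] then res.1 ++ [PySem.Str.join " " res.2] else res.1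

-- ===== PORT B =====
-- phase-1 loop body: state is (blocks, cur)
def pvStepBlk : List (List String) × List String → String → List (List String) × List String
  | (blocks, cur), line =>
    let s := PySem.Str.strip line
    if s = "" || PySem.Str.startswith s "#" then
      if cur ≠ [] then (blocks ++ [cur], []) else (blocks, cur)
    else (blocks, cur ++ [s])

-- phase-2 inner loop body: state is (commands, acc)
def pvStepCmd : List String × List String → String → List String × List String
  | (commands, acc), s =>
    if PySem.Str.endswith s "\\" then
      (commands, acc ++ [PySem.Str.rstrip (PySem.Str.slice s none (some (-1)))])
    else (commands ++ [PySem.Str.join " " (acc ++ [s])], [])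

-- phase-2 outer loop body: one block's commands appended to `commands`
def pvFlushBlock (commands : List String) (block : List String) : List String :=
  let r := block.foldl pvStepCmd (commands, [])
  if r.2 ≠ [] then r.1 ++ [PySem.Str.join " " r.2] else r.1

def get_valid_commands_from_text_alt (text : String) : List String :=
  if PySem.Str.strip text = "" then []
  else
    let st := ((PySem.Str.split? text "\n").getD []).foldl pvStepBlk ([], [])   -- sep "\n" ≠ "", so split? is always some
    let blocks := if st.2 ≠ [] then st.1 ++ [st.2] else st.1
    blocks.foldl pvFlushBlock []

-- ===== PRECONDITION & SPEC =====
def Spec_get_valid_commands_from_text (text : String) (out : List String) : Prop := out = get_valid_commands_from_text_alt text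
instance (text : String) (out : List String) : Decidable (Spec_get_valid_commands_from_text text out) := by unfold Spec_get_valid_commands_from_text; infer_instance

-- ===== CLAIM (what is proved, stated in full; the proofs are below) =====
def Claim_equal_get_valid_commands_from_text : Prop := ∀ (text : String), Dom_get_valid_commands_from_text text → Spec_get_valid_commands_from_text text (get_valid_commands_from_text text)

-- ===== LEMMAS AND PROOFS =====

-- finalize a (commands, pending) state
def pvFin (st : List String × List String) : List String :=
  if st.2 ≠ [] then st.1 ++ [PySem.Str.join " " st.2] else st.1

-- processing a block's lines from scratch
def pvProc (cb : List String) : List String × List String := cb.foldl pvStepCmd ([], [])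

theorem pvStepA_prefix (l : String) (p c u : List String) :
    pvStepA (p ++ c, u) l = (p ++ (pvStepA (c, u) l).1, (pvStepA (c, u) l).2) := by
  simp only [pvStepA]
  split_ifs <;> simp

theorem foldlA_prefix (ls : List String) (p c u : List String) :
    ls.foldl pvStepA (p ++ c, u) = (p ++ (ls.foldl pvStepA (c, u)).1, (ls.foldl pvStepA (c, u)).2) := by
  induction ls generalizing c u with
  | nil => simp
  | cons l ls ih =>
    simp only [List.foldl_cons, pvStepA_prefix]
    exact ih _ _

theorem pvStepBlk_prefix (l : String) (p : List (List String)) (c : List (List String)) (u : List String) :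
    pvStepBlk (p ++ c, u) l = (p ++ (pvStepBlk (c, u) l).1, (pvStepBlk (c, u) l).2) := by
  simp only [pvStepBlk]
  split_ifs <;> simp

theorem foldlBlk_prefix (ls : List String) (p c : List (List String)) (u : List String) :
    ls.foldl pvStepBlk (p ++ c, u) = (p ++ (ls.foldl pvStepBlk (c, u)).1, (ls.foldl pvStepBlk (c, u)).2) := by
  induction ls generalizing c u with
  | nil => simp
  | cons l ls ih =>
    simp only [List.foldl_cons, pvStepBlk_prefix]
    exact ih _ _

theorem pvStepCmd_prefix (s : String) (p c u : List String) :
    pvStepCmd (p ++ c, u) s = (p ++ (pvStepCmd (c, u) s).1, (pvStepCmd (c, u) s).2) := by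
  simp only [pvStepCmd]
  split_ifs <;> simp

theorem foldlCmd_prefix (ls : List String) (p c u : List String) :
    ls.foldl pvStepCmd (p ++ c, u) = (p ++ (ls.foldl pvStepCmd (c, u)).1, (ls.foldl pvStepCmd (c, u)).2) := by
  induction ls generalizing c u with
  | nil => simp
  | cons l ls ih =>
    simp only [List.foldl_cons, pvStepCmd_prefix]
    exact ih _ _

theorem pvFin_prefix (p : List String) (st : List String × List String) :
    pvFin (p ++ st.1, st.2) = p ++ pvFin st := by
  simp only [pvFin]
  split_ifs <;> simp

theorem pvFlushBlock_prefix (p c b : List String) :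
    pvFlushBlock (p ++ c) b = p ++ pvFlushBlock c b := by
  simp only [pvFlushBlock]
  have h := foldlCmd_prefix b p c []
  rw [h]
  split_ifs <;> simp

theorem foldlFlush_init (bl : List (List String)) (c : List String) :
    bl.foldl pvFlushBlock c = c ++ bl.foldl pvFlushBlock [] := by
  induction bl generalizing c with
  | nil => simp
  | cons b bl ih =>
    simp only [List.foldl_cons]
    have h : pvFlushBlock c b = c ++ pvFlushBlock [] b := by
      simpa using pvFlushBlock_prefix c [] b
    rw [h, ih (c ++ pvFlushBlock [] b), ih (pvFlushBlock [] b)]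
    simp

-- for non-separator lines, A's step is exactly B's phase-2 step on the stripped line
theorem pvStepA_eq_stepCmd (st : List String × List String) (l : String)
    (h : ¬ (PySem.Str.strip l = "" || PySem.Str.startswith (PySem.Str.strip l) "#") = true) :
    pvStepA st l = pvStepCmd st (PySem.Str.strip l) := by
  obtain ⟨c, u⟩ := st
  simp only [pvStepA, pvStepCmd]
  rw [if_neg (by simpa using h)]

theorem pvProc_snoc (cb : List String) (s : String) :
    pvProc (cb ++ [s]) = pvStepCmd (pvProc cb) s := by
  simp [pvProc]

-- main invariant: A's loop run from the state produced by a pending block cb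
-- equals B's block build-and-flush run with cb pending.
theorem pv_main (ls : List String) (cb : List String) :
    pvFin (ls.foldl pvStepA (pvProc cb)) =
      (if (ls.foldl pvStepBlk ([], cb)).2 ≠ [] then (ls.foldl pvStepBlk ([], cb)).1 ++ [(ls.foldl pvStepBlk ([], cb)).2]
       else (ls.foldl pvStepBlk ([], cb)).1).foldl pvFlushBlock [] := by
  induction ls generalizing cb with
  | nil =>
    simp only [List.foldl_nil]
    by_cases hcb : cb = []
    · subst hcb
      simp [pvProc, pvFin]
    · simp only [if_pos hcb, List.nil_append, List.foldl_cons, List.foldl_nil]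
      simp [pvFlushBlock, pvProc, pvFin]
  | cons l ls ih =>
    simp only [List.foldl_cons]
    by_cases hsep : (PySem.Str.strip l = "" || PySem.Str.startswith (PySem.Str.strip l) "#") = true
    · -- separator line: A flushes pending command, B closes the block
      have hA : ∀ st : List String × List String, pvStepA st l = (pvFin st, []) := by
        intro ⟨c, u⟩
        simp only [pvStepA, pvFin, if_pos hsep]
        split_ifs <;> simp_all
      have hB : pvStepBlk (([] : List (List String)), cb) l =
          ((if cb ≠ [] then [cb] else []), []) := by
        simp only [pvStepBlk, if_pos hsep]
        split_ifs <;> simp_all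
      rw [hA (pvProc cb), hB]
      have h1 : ls.foldl pvStepA (pvFin (pvProc cb), []) =
          (pvFin (pvProc cb) ++ (ls.foldl pvStepA ([], [])).1, (ls.foldl pvStepA ([], [])).2) := by
        have := foldlA_prefix ls (pvFin (pvProc cb)) [] []
        simpa using this
      rw [h1, pvFin_prefix]
      have h2 := ih []
      simp only [pvProc, List.foldl_nil] at h2
      rw [h2]
      -- now handle the B side: blocks start with the closed block
      have h3 : ls.foldl pvStepBlk ((if cb ≠ [] then [cb] else []), []) =
          ((if cb ≠ [] then [cb] else []) ++ (ls.foldl pvStepBlk ([], [])).1,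
           (ls.foldl pvStepBlk ([], [])).2) := by
        have := foldlBlk_prefix ls (if cb ≠ [] then [cb] else []) [] []
        simpa using this
      simp only [h3]
      set st := ls.foldl pvStepBlk (([] : List (List String)), ([] : List String)) with hst
      have h4 : (if (st.2 ≠ []) then ((if cb ≠ [] then [cb] else []) ++ st.1) ++ [st.2]
                 else ((if cb ≠ [] then [cb] else []) ++ st.1)) =
          (if cb ≠ [] then [cb] else []) ++ (if st.2 ≠ [] then st.1 ++ [st.2] else st.1) := by
        split_ifs <;> simp
      rw [h4, List.foldl_append, foldlFlush_init]
      by_cases hcb : cb = []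
      · subst hcb; simp [pvProc, pvFin]
      · simp only [if_pos hcb, List.foldl_cons, List.foldl_nil]
        simp only [pvFlushBlock, pvProc, pvFin]
        conv_rhs => rw [foldlFlush_init]
        simp
    · -- command line: both sides extend the pending block by the stripped line
      rw [pvStepA_eq_stepCmd _ _ hsep, ← pvProc_snoc]
      have hB : pvStepBlk (([] : List (List String)), cb) l = ([], cb ++ [PySem.Str.strip l]) := by
        simp only [pvStepBlk]
        rw [if_neg (by simpa using hsep)]
      rw [hB]
      exact ih (cb ++ [PySem.Str.strip l])

-- ===== VERDICT (by name: the statement is the Claim_ definition above) =====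
theorem get_valid_commands_from_text_spec : Claim_equal_get_valid_commands_from_text := by
  intro text _
  unfold Spec_get_valid_commands_from_text get_valid_commands_from_text get_valid_commands_from_text_alt
  by_cases h : PySem.Str.strip text = ""
  · simp [h]
  · simp only [if_neg h]
    have := pv_main ((PySem.Str.split? text "\n").getD []) []
    simp only [pvProc, List.foldl_nil] at this
    simpa [pvFin] using this
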